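-- pv_equiv track=rewrite | github.com/felipealfonsog/felipealfonsog | scripts/site_intel.py | detect_server_hint
-- ===== SOURCE A (Python) =====
-- from typing import Any, Dict, Optional, Tuple
--
-- def detect_server_hint(headers: Dict[str, str]) -> Tuple[str, str, str, str]:
--     lower = {k.lower(): str(v) for k, v in headers.items()}
--     server = lower.get("server", "")
--     powered = lower.get("x-powered-by", "")
--     server_low = server.lower()
--     powered_low = powered.lower()
--
--     if "apache" in server_low:
--         return "Apache-derived", "unix-like", "banner+tcl+tls", "LOW"
--     if "nginx" in server_low:
--         return "nginx-derived", "unix-like", "banner+tcl+tls", "LOW"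
--     if "litespeed" in server_low:
--         return "LiteSpeed-derived", "unix-like", "banner+tcl+tls", "LOW"
--     if "caddy" in server_low:
--         return "Caddy-derived", "unix-like", "banner+tcl+tls", "LOW"
--     if "iis" in server_low or "asp.net" in powered_low:
--         return "IIS-derived", "windows-like", "banner+tcl+tls", "LOW"
--     if "php" in powered_low:
--         return "PHP-backed", "unix-like", "banner+tcl+tls", "LOW"
--     if server_low or powered_low:
--         return "Application-fronted", "unix-like", "banner+tcl+tls", "LOW"
--
--     return "Unknown", "Unknown", "banner+tcl+tls", "LOW"
-- ===== SOURCE B (Python) =====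
-- def detect_server_hint(headers):
--     server = ""
--     powered = ""
--     for k, v in headers.items():
--         kl = k.lower()
--         if kl == "server":
--             server = str(v)
--         elif kl == "x-powered-by":
--             powered = str(v)
--     s = server.lower()
--     p = powered.lower()
--
--     table = [
--         (0, "apache" in s, "Apache-derived", "unix-like"),
--         (1, "nginx" in s, "nginx-derived", "unix-like"),
--         (2, "litespeed" in s, "LiteSpeed-derived", "unix-like"),
--         (3, "caddy" in s, "Caddy-derived", "unix-like"),
--         (4, "iis" in s or "asp.net" in p, "IIS-derived", "windows-like"),
--         (5, "php" in p, "PHP-backed", "unix-like"),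
--         (6, s != "" or p != "", "Application-fronted", "unix-like"),
--     ]
--     hits = [(pr, name, fam) for pr, hit, name, fam in table if hit]
--     if hits:
--         _, name, fam = min(hits, key=lambda t: t[0])
--         return name, fam, "banner+tcl+tls", "LOW"
--     return "Unknown", "Unknown", "banner+tcl+tls", "LOW"
-- ===== Notes on version B (the rewrite author's own statement) =====
-- stated objective: alternative
-- what changed: Instead of building a lowercased dict and running an early-exit if-cascade, B makes one forward pass over the headers with two overwrite accumulators for server/x-powered-by, then evaluates ALL classification rules into a priority-tagged hit list and returns the minimum-priority hit (collect-all-then-min instead of first-match cascade).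
import Mathlib
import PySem

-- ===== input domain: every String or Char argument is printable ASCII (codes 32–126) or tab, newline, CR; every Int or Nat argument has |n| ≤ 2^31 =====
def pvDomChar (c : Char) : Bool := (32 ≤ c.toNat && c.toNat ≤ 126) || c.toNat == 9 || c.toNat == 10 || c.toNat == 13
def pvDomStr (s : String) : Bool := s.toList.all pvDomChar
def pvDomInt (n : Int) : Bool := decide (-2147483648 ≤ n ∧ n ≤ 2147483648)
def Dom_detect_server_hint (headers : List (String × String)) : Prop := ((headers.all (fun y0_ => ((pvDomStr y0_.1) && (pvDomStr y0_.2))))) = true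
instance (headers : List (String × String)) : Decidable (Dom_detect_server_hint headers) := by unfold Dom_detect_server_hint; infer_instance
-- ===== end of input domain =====

-- B replaces A's lowercased-dict build + early-exit if-cascade by a single accumulator pass over the
-- headers and a collect-all-matches-then-minimum-priority selection (objective: alternative).

-- ===== PORT A =====
def detect_server_hint (headers : List (String × String)) : String × String × String × String :=
  let lower := headers.foldl (fun d p => d.insert (PySem.Str.lower p.1) p.2) PySem.Dict.empty
  let server := lower.getD "server" ""
  let powered := lower.getD "x-powered-by" ""
  let server_low := PySem.Str.lower server
  let powered_low := PySem.Str.lower powered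
  if PySem.Str.isIn "apache" server_low then ("Apache-derived", "unix-like", "banner+tcl+tls", "LOW")
  else if PySem.Str.isIn "nginx" server_low then ("nginx-derived", "unix-like", "banner+tcl+tls", "LOW")
  else if PySem.Str.isIn "litespeed" server_low then ("LiteSpeed-derived", "unix-like", "banner+tcl+tls", "LOW")
  else if PySem.Str.isIn "caddy" server_low then ("Caddy-derived", "unix-like", "banner+tcl+tls", "LOW")
  else if PySem.Str.isIn "iis" server_low || PySem.Str.isIn "asp.net" powered_low then ("IIS-derived", "windows-like", "banner+tcl+tls", "LOW")
  else if PySem.Str.isIn "php" powered_low then ("PHP-backed", "unix-like", "banner+tcl+tls", "LOW")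
  else if !(server_low == "") || !(powered_low == "") then ("Application-fronted", "unix-like", "banner+tcl+tls", "LOW")
  else ("Unknown", "Unknown", "banner+tcl+tls", "LOW")

-- ===== PORT B =====
def detect_server_hint_alt (headers : List (String × String)) : String × String × String × String :=
  -- one forward pass: two overwrite accumulators (if/elif on the lowered key)
  let sp := headers.foldl (fun acc kv =>
      let kl := PySem.Str.lower kv.1
      if kl == "server" then (kv.2, acc.2)
      else if kl == "x-powered-by" then (acc.1, kv.2)
      else acc) ("", "")
  let s := PySem.Str.lower sp.1
  let p := PySem.Str.lower sp.2
  let table : List (Int × Bool × String × String) :=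
    [ (0, PySem.Str.isIn "apache" s, "Apache-derived", "unix-like")
    , (1, PySem.Str.isIn "nginx" s, "nginx-derived", "unix-like")
    , (2, PySem.Str.isIn "litespeed" s, "LiteSpeed-derived", "unix-like")
    , (3, PySem.Str.isIn "caddy" s, "Caddy-derived", "unix-like")
    , (4, PySem.Str.isIn "iis" s || PySem.Str.isIn "asp.net" p, "IIS-derived", "windows-like")
    , (5, PySem.Str.isIn "php" p, "PHP-backed", "unix-like")
    , (6, !(s == "") || !(p == ""), "Application-fronted", "unix-like") ]
  let hits := (table.filter (fun r => r.2.1)).map (fun r => (r.1, r.2.2.1, r.2.2.2))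
  match PySem.List.min? hits (fun t => t.1) with
  | some m => (m.2.1, m.2.2, "banner+tcl+tls", "LOW")
  | none => ("Unknown", "Unknown", "banner+tcl+tls", "LOW")

-- ===== PRECONDITION & SPEC =====
def Spec_detect_server_hint (headers : List (String × String)) (out : String × String × String × String) : Prop := out = detect_server_hint_alt headers
instance (headers : List (String × String)) (out : String × String × String × String) : Decidable (Spec_detect_server_hint headers out) := by unfold Spec_detect_server_hint; infer_instance

-- ===== CLAIM (what is proved, stated in full; the proofs are below) =====
def Claim_equal_detect_server_hint : Prop := ∀ (headers : List (String × String)), Dom_detect_server_hint headers → Spec_detect_server_hint headers (detect_server_hint headers)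

-- ===== LEMMAS AND PROOFS =====

-- A's getD on the lowered-keys dict is "last value whose lowered key matches, else the dict's own answer".
theorem foldl_insert_get?_eq_find? (headers : List (String × String)) (d : PySem.Dict String String) (key : String) :
    (headers.foldl (fun d p => d.insert (PySem.Str.lower p.1) p.2) d).get? key =
      match headers.reverse.find? (fun p => PySem.Str.lower p.1 == key) with
      | some p => some p.2
      | none => d.get? key := by
  induction headers generalizing d with
  | nil => simp
  | cons h t ih =>
    simp only [List.foldl_cons, List.reverse_cons, List.find?_append]
    rw [ih]
    cases hf : t.reverse.find? (fun p => PySem.Str.lower p.1 == key) with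
    | some p => simp
    | none =>
      simp only [Option.none_or, List.find?_cons, List.find?_nil]
      by_cases hk : key = PySem.Str.lower h.1
      · subst hk
        simp [PySem.Dict.get?_insert_self]
      · rw [PySem.Dict.get?_insert_of_ne (hne := hk)]
        have : (PySem.Str.lower h.1 == key) = false := by
          simp [Ne.symm hk]
        simp [this]

-- B's single accumulator pass computes the same two "last matching value" lookups.
theorem foldl_acc_eq_find? (headers : List (String × String)) (acc : String × String) :
    headers.foldl (fun acc kv =>
        let kl := PySem.Str.lower kv.1
        if kl == "server" then (kv.2, acc.2)
        else if kl == "x-powered-by" then (acc.1, kv.2)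
        else acc) acc =
      ((match headers.reverse.find? (fun p => PySem.Str.lower p.1 == "server") with
        | some p => p.2
        | none => acc.1),
       (match headers.reverse.find? (fun p => PySem.Str.lower p.1 == "x-powered-by") with
        | some p => p.2
        | none => acc.2)) := by
  induction headers generalizing acc with
  | nil => simp
  | cons h t ih =>
    simp only [List.foldl_cons, List.reverse_cons, List.find?_append]
    rw [ih]
    cases hf1 : t.reverse.find? (fun p => PySem.Str.lower p.1 == "server") with
    | some p =>
      cases hf2 : t.reverse.find? (fun p => PySem.Str.lower p.1 == "x-powered-by") with
      | some q => simp
      | none =>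
        simp only [Option.some_or, Option.none_or, List.find?_cons, List.find?_nil]
        by_cases h2 : (PySem.Str.lower h.1 == "x-powered-by") = true
        · have h1 : (PySem.Str.lower h.1 == "server") = false := by
            rcases eq_of_beq h2 with e; simp [e]
          simp [h1, h2]
        · rw [Bool.not_eq_true] at h2
          by_cases h1 : (PySem.Str.lower h.1 == "server") = true
          · simp [h1, h2]
          · rw [Bool.not_eq_true] at h1
            simp [h1, h2]
    | none =>
      cases hf2 : t.reverse.find? (fun p => PySem.Str.lower p.1 == "x-powered-by") with
      | some q =>
        simp only [Option.some_or, Option.none_or, List.find?_cons, List.find?_nil]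
        by_cases h1 : (PySem.Str.lower h.1 == "server") = true
        · simp [h1]
        · rw [Bool.not_eq_true] at h1
          by_cases h2 : (PySem.Str.lower h.1 == "x-powered-by") = true
          · simp [h1, h2]
          · rw [Bool.not_eq_true] at h2
            simp [h1, h2]
      | none =>
        simp only [Option.none_or, List.find?_cons, List.find?_nil]
        by_cases h1 : (PySem.Str.lower h.1 == "server") = true
        · have h2 : (PySem.Str.lower h.1 == "x-powered-by") = false := by
            rcases eq_of_beq h1 with e; simp [e]
          simp [h1, h2]
        · rw [Bool.not_eq_true] at h1
          by_cases h2 : (PySem.Str.lower h.1 == "x-powered-by") = true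
          · simp [h1, h2]
          · rw [Bool.not_eq_true] at h2
            simp [h1, h2]

theorem getD_eq_find? (headers : List (String × String)) (key : String) :
    (headers.foldl (fun d p => d.insert (PySem.Str.lower p.1) p.2) PySem.Dict.empty).getD key "" =
      (match headers.reverse.find? (fun p => PySem.Str.lower p.1 == key) with
       | some p => p.2
       | none => "") := by
  rw [PySem.Dict.getD_eq_get?_getD, foldl_insert_get?_eq_find?]
  cases headers.reverse.find? (fun p => PySem.Str.lower p.1 == key) <;> simp

-- The early-exit cascade over (s, p) equals the collect-all + min-priority selection.
set_option maxHeartbeats 2000000 in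
theorem cascade_eq_min (s p : String) :
    (if PySem.Str.isIn "apache" s then (("Apache-derived" : String), ("unix-like" : String), ("banner+tcl+tls" : String), ("LOW" : String))
     else if PySem.Str.isIn "nginx" s then ("nginx-derived", "unix-like", "banner+tcl+tls", "LOW")
     else if PySem.Str.isIn "litespeed" s then ("LiteSpeed-derived", "unix-like", "banner+tcl+tls", "LOW")
     else if PySem.Str.isIn "caddy" s then ("Caddy-derived", "unix-like", "banner+tcl+tls", "LOW")
     else if PySem.Str.isIn "iis" s || PySem.Str.isIn "asp.net" p then ("IIS-derived", "windows-like", "banner+tcl+tls", "LOW")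
     else if PySem.Str.isIn "php" p then ("PHP-backed", "unix-like", "banner+tcl+tls", "LOW")
     else if !(s == "") || !(p == "") then ("Application-fronted", "unix-like", "banner+tcl+tls", "LOW")
     else ("Unknown", "Unknown", "banner+tcl+tls", "LOW")) =
    (let table : List (Int × Bool × String × String) :=
      [ (0, PySem.Str.isIn "apache" s, "Apache-derived", "unix-like")
      , (1, PySem.Str.isIn "nginx" s, "nginx-derived", "unix-like")
      , (2, PySem.Str.isIn "litespeed" s, "LiteSpeed-derived", "unix-like")
      , (3, PySem.Str.isIn "caddy" s, "Caddy-derived", "unix-like")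
      , (4, PySem.Str.isIn "iis" s || PySem.Str.isIn "asp.net" p, "IIS-derived", "windows-like")
      , (5, PySem.Str.isIn "php" p, "PHP-backed", "unix-like")
      , (6, !(s == "") || !(p == ""), "Application-fronted", "unix-like") ]
     let hits := (table.filter (fun r => r.2.1)).map (fun r => (r.1, r.2.2.1, r.2.2.2))
     match PySem.List.min? hits (fun t => t.1) with
     | some m => (m.2.1, m.2.2, "banner+tcl+tls", "LOW")
     | none => ("Unknown", "Unknown", "banner+tcl+tls", "LOW")) := by
  by_cases c1 : PySem.Str.isIn "apache" s = true <;>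
  by_cases c2 : PySem.Str.isIn "nginx" s = true <;>
  by_cases c3 : PySem.Str.isIn "litespeed" s = true <;>
  by_cases c4 : PySem.Str.isIn "caddy" s = true <;>
  by_cases c5 : (PySem.Str.isIn "iis" s || PySem.Str.isIn "asp.net" p) = true <;>
  by_cases c6 : PySem.Str.isIn "php" p = true <;>
  by_cases c7 : (!(s == "") || !(p == "")) = true <;>
  simp_all [PySem.List.min?]

-- ===== VERDICT (by name: the statement is the Claim_ definition above) =====
set_option maxHeartbeats 2000000 in
theorem detect_server_hint_spec : Claim_equal_detect_server_hint := by
  intro headers _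
  unfold Spec_detect_server_hint detect_server_hint detect_server_hint_alt
  simp only [getD_eq_find?, foldl_acc_eq_find?]
  exact cascade_eq_min _ _
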